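-- pv_equiv track=rewrite | github.com/KevinJGV/juan-jose | matrices.py/review-2.py | hayViaDirecta
-- ===== SOURCE A (Python) =====
-- def hayViaDirecta(redFerrocarriles, ciudadOrigen, ciudadDestino):
--     visitados = set()
--     via = [ciudadOrigen]
--
--     while via:
--         ciudadActual = via.pop(0)
--         if ciudadActual == ciudadDestino:
--             return True
--
--         visitados.add(ciudadActual)
--
--         for ciudadVecina in redFerrocarriles.get(ciudadActual, []):
--             if ciudadVecina not in visitados:
--                 via.append(ciudadVecina)
--
--     return False
-- ===== SOURCE B (Python) =====
-- def hayViaDirecta(redFerrocarriles, ciudadOrigen, ciudadDestino):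
--     # Queue-free fixed-point saturation: repeatedly sweep every city of the
--     # network, adding the neighbours of already-reachable cities, until the
--     # reachable set stops growing; then simply test membership of the
--     # destination.  No frontier/queue and no early return.
--     alcanzables = {ciudadOrigen}
--     cambio = True
--     while cambio:
--         cambio = False
--         for ciudad in redFerrocarriles:
--             if ciudad in alcanzables:
--                 for vecina in redFerrocarriles[ciudad]:
--                     if vecina not in alcanzables:
--                         alcanzables.add(vecina)
--                         cambio = True
--     return ciudadDestino in alcanzables
-- ===== Notes on version B (the rewrite author's own statement) =====
-- stated objective: alternative
-- what changed: Replaces A's queue-based graph search (FIFO frontier, pop(0), early return on dequeue) with queue-free fixed-point saturation: sweep the whole network repeatedly, adding neighbours of already-reachable cities, until the reachable set stops growing, then test membership of the destination.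
import Mathlib
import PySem

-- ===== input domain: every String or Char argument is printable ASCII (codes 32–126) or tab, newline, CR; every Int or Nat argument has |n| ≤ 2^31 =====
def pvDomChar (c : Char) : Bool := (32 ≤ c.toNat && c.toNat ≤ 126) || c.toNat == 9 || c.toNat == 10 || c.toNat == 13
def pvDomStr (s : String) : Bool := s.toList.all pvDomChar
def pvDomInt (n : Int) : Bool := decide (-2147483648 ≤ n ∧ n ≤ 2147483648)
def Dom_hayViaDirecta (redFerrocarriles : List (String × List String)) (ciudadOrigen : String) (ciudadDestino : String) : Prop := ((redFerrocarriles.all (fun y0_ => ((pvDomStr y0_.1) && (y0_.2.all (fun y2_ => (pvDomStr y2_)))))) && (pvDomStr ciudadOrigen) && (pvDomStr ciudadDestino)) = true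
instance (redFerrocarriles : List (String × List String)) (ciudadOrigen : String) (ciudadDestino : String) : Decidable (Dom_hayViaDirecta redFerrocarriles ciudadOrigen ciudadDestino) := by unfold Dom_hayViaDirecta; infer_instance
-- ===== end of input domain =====

-- B replaces A's queue-based search by queue-free fixed-point saturation (sweep the
-- whole network until the reachable set stops growing, then test membership).


-- ===== PORT A =====
-- redFerrocarriles.get(c, [])
def pvAdj (red : List (String × List String)) (c : String) : List String :=
  (PySem.Dict.mk red).getD c []

-- needed by the ports to build the `hU` argument of their loops (termination bookkeeping)
lemma pvAdj_subset_flat (red : List (String × List String)) (c x : String)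
    (h : x ∈ pvAdj red c) : x ∈ red.flatMap Prod.snd := by
  induction red with
  | nil => simp [pvAdj, PySem.Dict.getD, PySem.Dict.get?] at h
  | cons p t ih =>
    rw [pvAdj, PySem.Dict.getD_eq_get?_getD, PySem.Dict.get?_mk_cons] at h
    by_cases hk : (p.1 == c) = true
    · rw [if_pos hk] at h
      simp only [Option.getD_some] at h
      exact List.mem_flatMap.2 ⟨p, List.mem_cons_self, h⟩
    · rw [if_neg hk, ← PySem.Dict.getD_eq_get?_getD] at h
      obtain ⟨q, hq, hxq⟩ := List.mem_flatMap.1 (ih h)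
      exact List.mem_flatMap.2 ⟨q, List.mem_cons_of_mem _ hq, hxq⟩

-- the while-loop of A; `U`, `hU`, `hvia` only justify termination
def hayViaDirectaLoop (red : List (String × List String)) (dest : String) (U : List String)
    (hU : ∀ c x, x ∈ pvAdj red c → x ∈ U)
    (visitados : PySem.Set String) (via : List String)
    (hvia : ∀ x ∈ via, x ∈ U) : Bool :=
  match via with
  | [] => false
  | c :: rest =>
    if c = dest then true
    else
      hayViaDirectaLoop red dest U hU (PySem.Set.add visitados c)
        (rest ++ (pvAdj red c).filter (fun n => !(PySem.Set.contains (PySem.Set.add visitados c) n)))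
        (by
          intro x hx
          rcases List.mem_append.1 hx with h | h
          · exact hvia x (List.mem_cons_of_mem _ h)
          · exact hU c x (List.mem_filter.1 h).1)
termination_by ((U.toFinset \ visitados.toFinset).card, via.countP (fun x => PySem.Set.contains visitados x))
decreasing_by
  by_cases hc : PySem.Set.contains visitados c = true
  · -- c already visited: the set is unchanged, the visited-entry count of the queue drops
    have hcm : c ∈ visitados := by simpa using hc
    have hadd : PySem.Set.add visitados c = visitados := by simp [PySem.Set.add, hcm]
    rw [hadd]
    apply Prod.Lex.right
    simp [PySem.Set.contains, List.countP_append, List.countP_filter, hcm]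
  · -- c newly visited: U \ visitados strictly shrinks (c ∈ U by hvia)
    have hcm : c ∉ visitados := fun hm => hc (by simpa using hm)
    apply Prod.Lex.left
    apply Finset.card_lt_card
    rw [Finset.ssubset_iff_of_subset]
    · refine ⟨c, ?_, ?_⟩
      · rw [Finset.mem_sdiff]
        exact ⟨List.mem_toFinset.2 (hvia c List.mem_cons_self),
               fun hm => hcm (List.mem_toFinset.1 hm)⟩
      · rw [Finset.mem_sdiff]
        rintro ⟨-, hnot⟩
        exact hnot (List.mem_toFinset.2 ((PySem.Set.mem_add _ _ _).2 (Or.inr rfl)))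
    · intro a ha
      rw [Finset.mem_sdiff] at ha ⊢
      exact ⟨ha.1, fun hm => ha.2 (List.mem_toFinset.2
        ((PySem.Set.mem_add _ _ _).2 (Or.inl (List.mem_toFinset.1 hm))))⟩

def hayViaDirecta (redFerrocarriles : List (String × List String)) (ciudadOrigen : String) (ciudadDestino : String) : Bool :=
  hayViaDirectaLoop redFerrocarriles ciudadDestino (ciudadOrigen :: redFerrocarriles.flatMap Prod.snd)
    (fun c x hx => List.mem_cons_of_mem _ (pvAdj_subset_flat redFerrocarriles c x hx))
    PySem.Set.empty [ciudadOrigen]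
    (fun x hx => by obtain rfl := List.mem_singleton.1 hx; exact List.mem_cons_self)

-- ===== PORT B =====
-- inner `for vecina in redFerrocarriles[ciudad]` loop of B: add unseen neighbours, flag change
def pvAltInner (R : PySem.Set String) (ch : Bool) : List String → PySem.Set String × Bool
  | [] => (R, ch)
  | v :: t =>
    if PySem.Set.contains R v then pvAltInner R ch t
    else pvAltInner (PySem.Set.add R v) true t

-- one full sweep `for ciudad in redFerrocarriles` of B (over the key list)
def pvAltSweep (red : List (String × List String)) (R : PySem.Set String) (ch : Bool) :
    List String → PySem.Set String × Bool
  | [] => (R, ch)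
  | c :: ks =>
    if PySem.Set.contains R c then
      let p := pvAltInner R ch (pvAdj red c)
      pvAltSweep red p.1 p.2 ks
    else pvAltSweep red R ch ks

-- shape of the inner loop, needed by pvAltSaturate for termination
lemma pvAltInner_spec : ∀ (ns : List String) (R : PySem.Set String) (ch : Bool),
    ∃ fresh, pvAltInner R ch ns = (R ++ fresh, ch || decide (fresh ≠ [])) ∧
      (∀ x ∈ fresh, x ∈ ns ∧ x ∉ R) ∧ (∀ x ∈ ns, x ∈ R ∨ x ∈ fresh) := by
  intro ns
  induction ns with
  | nil => intro R ch; exact ⟨[], by simp [pvAltInner], by simp, by simp⟩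
  | cons v t ih =>
    intro R ch
    rw [pvAltInner]
    by_cases hv : PySem.Set.contains R v = true
    · rw [if_pos hv]
      obtain ⟨fresh, h1, h2, h3⟩ := ih R ch
      have hvm : v ∈ R := by simpa using hv
      exact ⟨fresh, h1, fun x hx => ⟨List.mem_cons_of_mem _ (h2 x hx).1, (h2 x hx).2⟩,
        fun x hx => (List.mem_cons.1 hx).elim (fun he => he ▸ Or.inl hvm) (h3 x)⟩
    · rw [if_neg hv]
      have hvm : v ∉ R := fun hm => hv (by simpa using hm)
      have hadd : PySem.Set.add R v = R ++ [v] := by rw [PySem.Set.add, if_neg hv]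
      obtain ⟨fresh, h1, h2, h3⟩ := ih (PySem.Set.add R v) true
      refine ⟨v :: fresh, ?_, ?_, ?_⟩
      · rw [h1, hadd]; simp
      · intro x hx
        rcases List.mem_cons.1 hx with rfl | hx
        · exact ⟨List.mem_cons_self, hvm⟩
        · refine ⟨List.mem_cons_of_mem _ (h2 x hx).1, fun hm => (h2 x hx).2 ?_⟩
          rw [hadd]; exact List.mem_append.2 (Or.inl hm)
      · intro x hx
        rcases List.mem_cons.1 hx with rfl | hx
        · exact Or.inr List.mem_cons_self
        · rcases h3 x hx with h | h
          · rw [hadd] at h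
            rcases List.mem_append.1 h with h | h
            · exact Or.inl h
            · obtain rfl := List.mem_singleton.1 h; exact Or.inr List.mem_cons_self
          · exact Or.inr (List.mem_cons_of_mem _ h)

-- shape of one sweep, needed by pvAltSaturate for termination
lemma pvAltSweep_spec (red : List (String × List String)) :
    ∀ (ks : List String) (R : PySem.Set String) (ch : Bool),
    ∃ fresh, pvAltSweep red R ch ks = (R ++ fresh, ch || decide (fresh ≠ [])) ∧
      (∀ x ∈ fresh, x ∈ red.flatMap Prod.snd ∧ x ∉ R) := by
  intro ks
  induction ks with
  | nil => intro R ch; exact ⟨[], by simp [pvAltSweep], by simp⟩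
  | cons c t ih =>
    intro R ch
    rw [pvAltSweep]
    by_cases hc : PySem.Set.contains R c = true
    · rw [if_pos hc]
      obtain ⟨f1, h1, h2, _⟩ := pvAltInner_spec (pvAdj red c) R ch
      obtain ⟨f2, g1, g2⟩ := ih (R ++ f1) (ch || decide (f1 ≠ []))
      refine ⟨f1 ++ f2, ?_, ?_⟩
      · simp only [h1]
        rw [g1, List.append_assoc]
        congr 1
        cases f1 <;> cases f2 <;> simp
      · intro x hx
        rcases List.mem_append.1 hx with hx | hx
        · exact ⟨pvAdj_subset_flat red c x (h2 x hx).1, (h2 x hx).2⟩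
        · exact ⟨(g2 x hx).1, fun hm => (g2 x hx).2 (List.mem_append.2 (Or.inl hm))⟩
    · rw [if_neg hc]; exact ih R ch

-- the `while cambio` loop of B; `U`, `hU`, `hR` only justify termination
def pvAltSaturate (red : List (String × List String)) (U : List String)
    (hU : ∀ x ∈ red.flatMap Prod.snd, x ∈ U)
    (R : PySem.Set String) (hR : ∀ x ∈ R, x ∈ U) : PySem.Set String :=
  match h : pvAltSweep red R false (red.map Prod.fst) with
  | (R', true) =>
    pvAltSaturate red U hU R'
      (by
        obtain ⟨fresh, h1, h2⟩ := pvAltSweep_spec red (red.map Prod.fst) R false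
        rw [h, Prod.mk.injEq] at h1
        obtain ⟨hRe, -⟩ := h1
        intro x hx
        rw [hRe] at hx
        rcases List.mem_append.1 hx with hx' | hx'
        · exact hR x hx'
        · exact hU x (h2 x hx').1)
  | (R', false) => R'
termination_by (U.toFinset \ R.toFinset).card
decreasing_by
  obtain ⟨fresh, h1, h2⟩ := pvAltSweep_spec red (red.map Prod.fst) R false
  rw [h, Prod.mk.injEq] at h1
  obtain ⟨hR', hch⟩ := h1
  have hfne : fresh ≠ [] := by
    intro he; rw [he] at hch; simp at hch
  obtain ⟨f, hf⟩ := List.exists_mem_of_ne_nil fresh hfne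
  apply Finset.card_lt_card
  rw [Finset.ssubset_iff_of_subset]
  · refine ⟨f, ?_, ?_⟩
    · rw [Finset.mem_sdiff]
      exact ⟨List.mem_toFinset.2 (hU f (h2 f hf).1),
             fun hm => (h2 f hf).2 (List.mem_toFinset.1 hm)⟩
    · rw [Finset.mem_sdiff]
      rintro ⟨-, hnot⟩
      exact hnot (List.mem_toFinset.2 (hR' ▸ List.mem_append.2 (Or.inr hf)))
  · intro a ha
    rw [Finset.mem_sdiff] at ha ⊢
    exact ⟨ha.1, fun hm => ha.2 (List.mem_toFinset.2
      (hR' ▸ List.mem_append.2 (Or.inl (List.mem_toFinset.1 hm))))⟩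

def hayViaDirecta_alt (redFerrocarriles : List (String × List String)) (ciudadOrigen : String) (ciudadDestino : String) : Bool :=
  PySem.Set.contains
    (pvAltSaturate redFerrocarriles (ciudadOrigen :: redFerrocarriles.flatMap Prod.snd)
      (fun x hx => List.mem_cons_of_mem _ hx)
      (PySem.Set.ofList [ciudadOrigen])
      (fun x hx => by
        have : x = ciudadOrigen := by
          simpa [PySem.Set.ofList, PySem.Set.add, PySem.Set.empty] using hx
        exact this ▸ List.mem_cons_self))
    ciudadDestino

-- ===== PRECONDITION & SPEC =====
def Spec_hayViaDirecta (redFerrocarriles : List (String × List String)) (ciudadOrigen : String) (ciudadDestino : String) (out : Bool) : Prop := out = hayViaDirecta_alt redFerrocarriles ciudadOrigen ciudadDestino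
instance (redFerrocarriles : List (String × List String)) (ciudadOrigen : String) (ciudadDestino : String) (out : Bool) : Decidable (Spec_hayViaDirecta redFerrocarriles ciudadOrigen ciudadDestino out) := by unfold Spec_hayViaDirecta; infer_instance

-- ===== CLAIM (what is proved, stated in full; the proofs are below) =====
def Claim_equal_hayViaDirecta : Prop := ∀ (redFerrocarriles : List (String × List String)) (ciudadOrigen : String) (ciudadDestino : String), Dom_hayViaDirecta redFerrocarriles ciudadOrigen ciudadDestino → Spec_hayViaDirecta redFerrocarriles ciudadOrigen ciudadDestino (hayViaDirecta redFerrocarriles ciudadOrigen ciudadDestino)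

-- ===== LEMMAS AND PROOFS =====

-- one edge of the rail network
def pvEdge (red : List (String × List String)) (u v : String) : Prop := v ∈ pvAdj red u
-- one edge whose target avoids the set V
def pvEdgeA (red : List (String × List String)) (V : List String) (u v : String) : Prop :=
  v ∈ pvAdj red u ∧ v ∉ V

lemma pvRtgA_mono (red : List (String × List String)) (V V' : List String)
    (sub : ∀ a ∈ V, a ∈ V') (x d : String)
    (h : Relation.ReflTransGen (pvEdgeA red V') x d) :
    Relation.ReflTransGen (pvEdgeA red V) x d :=
  Relation.ReflTransGen.mono (fun _ _ hb => ⟨hb.1, fun hm => hb.2 (sub _ hm)⟩) h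

-- enlarging the avoided set: either the whole walk still avoids V', or some newly
-- avoided node z lies on it and the remaining walk from z avoids V'
lemma pvShortcut (red : List (String × List String)) (V V' : List String)
    (_sub : ∀ a ∈ V, a ∈ V') (x d : String)
    (h : Relation.ReflTransGen (pvEdgeA red V) x d) :
    Relation.ReflTransGen (pvEdgeA red V') x d ∨
      ∃ z, z ∈ V' ∧ z ∉ V ∧ Relation.ReflTransGen (pvEdgeA red V') z d := by
  induction h using Relation.ReflTransGen.head_induction_on with
  | refl => exact Or.inl Relation.ReflTransGen.refl
  | @head a y h' hrt ih =>
    rcases ih with ih | ih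
    · by_cases hy : y ∈ V'
      · exact Or.inr ⟨y, hy, h'.2, ih⟩
      · exact Or.inl (Relation.ReflTransGen.head ⟨h'.1, hy⟩ ih)
    · exact Or.inr ih

lemma aLoop_iff (red : List (String × List String)) (dest : String) (U : List String)
    (hU : ∀ c x, x ∈ pvAdj red c → x ∈ U) :
    ∀ (visitados : PySem.Set String) (via : List String) (hvia : ∀ x ∈ via, x ∈ U),
    (hayViaDirectaLoop red dest U hU visitados via hvia = true ↔
      ∃ x ∈ via, Relation.ReflTransGen (pvEdgeA red visitados) x dest) := by
  intro visitados via hvia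
  induction visitados, via, hvia using hayViaDirectaLoop.induct red dest U hU with
  | case1 visitados hvia _ => simp [hayViaDirectaLoop]
  | case2 visitados rest hvia _ =>
    rw [hayViaDirectaLoop, if_pos rfl]
    exact ⟨fun _ => ⟨dest, List.mem_cons_self, Relation.ReflTransGen.refl⟩, fun _ => rfl⟩
  | case3 visitados c rest hvia hne _ ih =>
    rw [hayViaDirectaLoop]
    rw [if_neg hne, ih]
    constructor
    · rintro ⟨x, hx, hr⟩
      rcases List.mem_append.1 hx with hx | hx
      · exact ⟨x, List.mem_cons_of_mem _ hx,
          pvRtgA_mono red visitados _ (fun a ha => (PySem.Set.mem_add _ _ _).2 (Or.inl ha)) x dest hr⟩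
      · have hmf := List.mem_filter.1 hx
        have hxnv : x ∉ PySem.Set.add visitados c := by simpa using hmf.2
        refine ⟨c, List.mem_cons_self, Relation.ReflTransGen.head
          ⟨hmf.1, fun hm => hxnv ((PySem.Set.mem_add _ _ _).2 (Or.inl hm))⟩
          (pvRtgA_mono red visitados _ (fun a ha => (PySem.Set.mem_add _ _ _).2 (Or.inl ha)) x dest hr)⟩
    · rintro ⟨x, hx, hr⟩
      rcases pvShortcut red visitados (PySem.Set.add visitados c)
          (fun a ha => (PySem.Set.mem_add _ _ _).2 (Or.inl ha)) x dest hr with h | ⟨z, hz, hznv, hzr⟩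
      · rcases List.mem_cons.1 hx with rfl | hx
        · rcases Relation.ReflTransGen.cases_head h with heq | ⟨y, hy, hyr⟩
          · exact absurd heq hne
          · exact ⟨y, List.mem_append.2 (Or.inr (List.mem_filter.2 ⟨hy.1, by simpa using hy.2⟩)), hyr⟩
        · exact ⟨x, List.mem_append.2 (Or.inl hx), h⟩
      · have hzc : z = c := by
          rcases (PySem.Set.mem_add _ _ _).1 hz with h' | h'
          · exact absurd h' hznv
          · exact h'
        subst hzc
        rcases Relation.ReflTransGen.cases_head hzr with heq | ⟨y, hy, hyr⟩
        · exact absurd heq hne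
        · exact ⟨y, List.mem_append.2 (Or.inr (List.mem_filter.2 ⟨hy.1, by simpa using hy.2⟩)), hyr⟩

lemma a_iff_reach (red : List (String × List String)) (o d : String) :
    hayViaDirecta red o d = true ↔ Relation.ReflTransGen (pvEdge red) o d := by
  rw [hayViaDirecta, aLoop_iff]
  constructor
  · rintro ⟨x, hx, hr⟩
    obtain rfl := List.mem_singleton.1 hx
    exact Relation.ReflTransGen.mono (fun _ _ hb => hb.1) hr
  · intro h
    refine ⟨o, List.mem_cons_self, ?_⟩
    exact Relation.ReflTransGen.mono (fun _ _ hb => ⟨hb, by simp [PySem.Set.empty]⟩) h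

-- ----- B-side lemmas -----

-- a key whose adjacency contributes is in the key list
lemma pvAdj_key (red : List (String × List String)) (c x : String)
    (h : x ∈ pvAdj red c) : c ∈ red.map Prod.fst := by
  induction red with
  | nil => simp [pvAdj, PySem.Dict.getD, PySem.Dict.get?] at h
  | cons p t ih =>
    rw [pvAdj, PySem.Dict.getD_eq_get?_getD, PySem.Dict.get?_mk_cons] at h
    by_cases hk : (p.1 == c) = true
    · exact List.mem_map.2 ⟨p, List.mem_cons_self, eq_of_beq hk⟩
    · rw [if_neg hk, ← PySem.Dict.getD_eq_get?_getD] at h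
      exact List.mem_cons_of_mem _ (ih h)

-- a sweep that reports no change leaves R closed under every key's adjacency
lemma pvAltSweep_closed (red : List (String × List String)) :
    ∀ (ks : List String) (R : PySem.Set String),
    pvAltSweep red R false ks = (R, false) →
    ∀ c ∈ ks, c ∈ R → ∀ v ∈ pvAdj red c, v ∈ R := by
  intro ks
  induction ks with
  | nil => intro R _ c hc; simp at hc
  | cons c t ih =>
    intro R hsw c' hc' hc'R v hv
    rw [pvAltSweep] at hsw
    by_cases hc : PySem.Set.contains R c = true
    · rw [if_pos hc] at hsw
      obtain ⟨f1, h1, _, h3⟩ := pvAltInner_spec (pvAdj red c) R false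
      rw [h1] at hsw
      obtain ⟨f2, g1, _⟩ := pvAltSweep_spec red t (R ++ f1) (false || decide (f1 ≠ []))
      rw [g1, Prod.mk.injEq] at hsw
      obtain ⟨hR, hch⟩ := hsw
      simp only [Bool.or_eq_false_iff, decide_eq_false_iff_not, not_not] at hch
      obtain ⟨⟨-, hf1⟩, hf2⟩ := hch
      subst hf1; subst hf2
      have hsw' : pvAltSweep red R false t = (R, false) := by simpa using g1
      rcases List.mem_cons.1 hc' with rfl | hc'
      · rcases h3 v hv with h | h
        · exact h
        · exact absurd h (List.not_mem_nil)
      · exact ih R hsw' c' hc' hc'R v hv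
    · rw [if_neg hc] at hsw
      rcases List.mem_cons.1 hc' with rfl | hc'
      · exact absurd (by simpa using hc'R) hc
      · exact ih R hsw c' hc' hc'R v hv

-- unfolding equations for the saturation loop (the match carries proof arguments)
lemma pvAltSaturate_step_true (red : List (String × List String)) (U : List String)
    (hU : ∀ x ∈ red.flatMap Prod.snd, x ∈ U) (R : PySem.Set String) (hR : ∀ x ∈ R, x ∈ U)
    (R' : PySem.Set String) (h : pvAltSweep red R false (red.map Prod.fst) = (R', true))
    (hR' : ∀ x ∈ R', x ∈ U) :
    pvAltSaturate red U hU R hR = pvAltSaturate red U hU R' hR' := by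
  rw [pvAltSaturate]
  split
  · rename_i R2 heq
    rw [h, Prod.mk.injEq] at heq
    obtain ⟨h1, -⟩ := heq
    subst h1
    rfl
  · rename_i R2 heq
    rw [h] at heq
    simp at heq

lemma pvAltSaturate_step_false (red : List (String × List String)) (U : List String)
    (hU : ∀ x ∈ red.flatMap Prod.snd, x ∈ U) (R : PySem.Set String) (hR : ∀ x ∈ R, x ∈ U)
    (R' : PySem.Set String) (h : pvAltSweep red R false (red.map Prod.fst) = (R', false)) :
    pvAltSaturate red U hU R hR = R' := by
  rw [pvAltSaturate]
  split
  · rename_i R2 heq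
    rw [h] at heq
    simp at heq
  · rename_i R2 heq
    rw [h, Prod.mk.injEq] at heq
    exact heq.1.symm

-- saturation only grows R
lemma pvAltSaturate_mono (red : List (String × List String)) (U : List String)
    (hU : ∀ x ∈ red.flatMap Prod.snd, x ∈ U) :
    ∀ (R : PySem.Set String) (hR : ∀ x ∈ R, x ∈ U) (x : String), x ∈ R →
      x ∈ pvAltSaturate red U hU R hR := by
  intro R hR
  induction R, hR using pvAltSaturate.induct red U hU with
  | case1 R hR R' h ih =>
    intro x hx
    obtain ⟨fresh, h1, h2⟩ := pvAltSweep_spec red (red.map Prod.fst) R false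
    rw [h, Prod.mk.injEq] at h1
    have hR' : ∀ y ∈ R', y ∈ U := by
      intro y hy
      rw [h1.1] at hy
      rcases List.mem_append.1 hy with hy | hy
      · exact hR y hy
      · exact hU y (h2 y hy).1
    rw [pvAltSaturate_step_true red U hU R hR R' h hR']
    apply ih
    rw [h1.1]
    exact List.mem_append.2 (Or.inl hx)
  | case2 R hR R' h =>
    intro x hx
    obtain ⟨fresh, h1, _⟩ := pvAltSweep_spec red (red.map Prod.fst) R false
    rw [h, Prod.mk.injEq] at h1
    rw [pvAltSaturate_step_false red U hU R hR R' h, h1.1]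
    exact List.mem_append.2 (Or.inl hx)

-- every element of the saturated set satisfies any edge-closed predicate true on R
lemma pvAltSaturate_sound (red : List (String × List String)) (U : List String)
    (hU : ∀ x ∈ red.flatMap Prod.snd, x ∈ U) (P : String → Prop)
    (hP : ∀ c v, P c → v ∈ pvAdj red c → P v) :
    ∀ (R : PySem.Set String) (hR : ∀ x ∈ R, x ∈ U), (∀ x ∈ R, P x) →
      ∀ x ∈ pvAltSaturate red U hU R hR, P x := by
  have hinner : ∀ (ns : List String) (R : PySem.Set String) (ch : Bool),
      (∀ x ∈ R, P x) → (∀ v ∈ ns, P v) → ∀ x ∈ (pvAltInner R ch ns).1, P x := by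
    intro ns R ch hR hns
    obtain ⟨fresh, h1, h2, _⟩ := pvAltInner_spec ns R ch
    rw [h1]
    intro x hx
    rcases List.mem_append.1 hx with hx | hx
    · exact hR x hx
    · exact hns x (h2 x hx).1
  have hsweep : ∀ (ks : List String) (R : PySem.Set String) (ch : Bool),
      (∀ x ∈ R, P x) → ∀ x ∈ (pvAltSweep red R ch ks).1, P x := by
    intro ks
    induction ks with
    | nil => intro R ch hR; simpa [pvAltSweep] using hR
    | cons c t ih =>
      intro R ch hR
      rw [pvAltSweep]
      by_cases hc : PySem.Set.contains R c = true
      · rw [if_pos hc]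
        have hcP : P c := hR c (by simpa using hc)
        exact ih _ _ (hinner (pvAdj red c) R ch hR (fun v hv => hP c v hcP hv))
      · rw [if_neg hc]; exact ih R ch hR
  intro R hR
  induction R, hR using pvAltSaturate.induct red U hU with
  | case1 R hR R' h ih =>
    intro hRP
    obtain ⟨fresh, h1, h2⟩ := pvAltSweep_spec red (red.map Prod.fst) R false
    rw [h, Prod.mk.injEq] at h1
    have hR' : ∀ y ∈ R', y ∈ U := by
      intro y hy
      rw [h1.1] at hy
      rcases List.mem_append.1 hy with hy | hy
      · exact hR y hy
      · exact hU y (h2 y hy).1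
    rw [pvAltSaturate_step_true red U hU R hR R' h hR']
    apply ih
    have := hsweep (red.map Prod.fst) R false hRP
    rw [h] at this
    exact this
  | case2 R hR R' h =>
    intro hRP
    rw [pvAltSaturate_step_false red U hU R hR R' h]
    have := hsweep (red.map Prod.fst) R false hRP
    rw [h] at this
    exact this

-- the saturated set is closed under edges
lemma pvAltSaturate_closed (red : List (String × List String)) (U : List String)
    (hU : ∀ x ∈ red.flatMap Prod.snd, x ∈ U) :
    ∀ (R : PySem.Set String) (hR : ∀ x ∈ R, x ∈ U) (c v : String),
      v ∈ pvAdj red c → c ∈ pvAltSaturate red U hU R hR → v ∈ pvAltSaturate red U hU R hR := by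
  intro R hR
  induction R, hR using pvAltSaturate.induct red U hU with
  | case1 R hR R' h ih =>
    intro c v hv hc
    obtain ⟨fresh, h1, h2⟩ := pvAltSweep_spec red (red.map Prod.fst) R false
    rw [h, Prod.mk.injEq] at h1
    have hR' : ∀ y ∈ R', y ∈ U := by
      intro y hy
      rw [h1.1] at hy
      rcases List.mem_append.1 hy with hy | hy
      · exact hR y hy
      · exact hU y (h2 y hy).1
    rw [pvAltSaturate_step_true red U hU R hR R' h hR'] at hc ⊢
    exact ih c v hv hc
  | case2 R hR R' h =>
    intro c v hv hc
    rw [pvAltSaturate_step_false red U hU R hR R' h] at hc ⊢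
    obtain ⟨fresh, h1, _⟩ := pvAltSweep_spec red (red.map Prod.fst) R false
    rw [h, Prod.mk.injEq] at h1
    obtain ⟨hRe, hch⟩ := h1
    simp only [Bool.false_or] at hch
    have hf : fresh = [] := by
      by_contra hne
      rw [decide_eq_true hne] at hch
      exact Bool.false_ne_true hch
    subst hf
    simp only [List.append_nil] at hRe
    subst hRe
    have hclose := pvAltSweep_closed red (red.map Prod.fst) R' (by simpa using h)
    exact hclose c (pvAdj_key red c v hv) hc v hv

lemma b_iff_reach (red : List (String × List String)) (o d : String) :
    hayViaDirecta_alt red o d = true ↔ Relation.ReflTransGen (pvEdge red) o d := by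
  rw [hayViaDirecta_alt]
  have hmemo : ∀ x, x ∈ PySem.Set.ofList [o] ↔ x = o := by
    intro x; simp [PySem.Set.ofList, PySem.Set.add, PySem.Set.empty]
  constructor
  · intro h
    refine pvAltSaturate_sound red (o :: red.flatMap Prod.snd)
      (fun x hx => List.mem_cons_of_mem _ hx)
      (fun x => Relation.ReflTransGen (pvEdge red) o x)
      (fun c v hc hv => Relation.ReflTransGen.tail hc hv)
      (PySem.Set.ofList [o])
      (fun x hx => by
        have : x = o := by
          simpa [PySem.Set.ofList, PySem.Set.add, PySem.Set.empty] using hx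
        exact this ▸ List.mem_cons_self)
      (fun x hx => by obtain rfl := (hmemo x).1 hx; exact Relation.ReflTransGen.refl) d ?_
    simpa using h
  · intro h
    have hmem : d ∈ pvAltSaturate red (o :: red.flatMap Prod.snd)
        (fun x hx => List.mem_cons_of_mem _ hx) (PySem.Set.ofList [o])
        (fun x hx => by
          have : x = o := by
            simpa [PySem.Set.ofList, PySem.Set.add, PySem.Set.empty] using hx
          exact this ▸ List.mem_cons_self) := by
      induction h with
      | refl =>
        exact pvAltSaturate_mono red _ _ _ _ o ((hmemo o).2 rfl)
      | tail hbc hedge ih =>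
        exact pvAltSaturate_closed red _ _ _ _ _ _ hedge ih
    simpa using hmem

-- ===== VERDICT (by name: the statement is the Claim_ definition above) =====
theorem hayViaDirecta_spec : Claim_equal_hayViaDirecta := by
  intro red o d _
  unfold Spec_hayViaDirecta
  rw [Bool.eq_iff_iff, a_iff_reach, b_iff_reach]
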